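-- pv_equiv track=rewrite | github.com/hangnew/coding_exercices | ex20211130.py | whosdaMax
-- ===== SOURCE A (Python) =====
-- def whosdaMax(lst):
-- 	test_nums = [0] * (max(lst) - min(lst) + 5)
-- 	loc = min(lst) - 2
-- 	for sample in lst:
-- 		idx = sample - loc
-- 		test_nums[idx - 2] += 1
-- 		test_nums[idx - 1] += 1
-- 		test_nums[idx] += 1
-- 		test_nums[idx + 1] += 1
-- 		test_nums[idx + 2] += 1
-- 	return test_nums.index(max(test_nums)) + loc
-- ===== SOURCE B (Python) =====
-- def whosdaMax(lst):
--     freq = {}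
--     for s in lst:
--         freq[s] = freq.get(s, 0) + 1
--     lo = min(lst) - 2
--     hi = max(lst) + 2
--     best_p, best_c = 0, -1
--     for c in range(lo, hi + 1):
--         cnt = (freq.get(c - 2, 0) + freq.get(c - 1, 0) + freq.get(c, 0)
--                + freq.get(c + 1, 0) + freq.get(c + 2, 0))
--         if cnt > best_c:
--             best_p, best_c = c, cnt
--     return best_p
-- ===== Notes on version B (the rewrite author's own statement) =====
-- stated objective: alternative
-- what changed: B tallies samples into a dict frequency counter and does one running first-argmax sweep over the candidate positions, instead of A's scatter-incrementing a dense (max-min+5)-slot array five cells per sample and then calling test_nums.index(max(test_nums)).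
import Mathlib
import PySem

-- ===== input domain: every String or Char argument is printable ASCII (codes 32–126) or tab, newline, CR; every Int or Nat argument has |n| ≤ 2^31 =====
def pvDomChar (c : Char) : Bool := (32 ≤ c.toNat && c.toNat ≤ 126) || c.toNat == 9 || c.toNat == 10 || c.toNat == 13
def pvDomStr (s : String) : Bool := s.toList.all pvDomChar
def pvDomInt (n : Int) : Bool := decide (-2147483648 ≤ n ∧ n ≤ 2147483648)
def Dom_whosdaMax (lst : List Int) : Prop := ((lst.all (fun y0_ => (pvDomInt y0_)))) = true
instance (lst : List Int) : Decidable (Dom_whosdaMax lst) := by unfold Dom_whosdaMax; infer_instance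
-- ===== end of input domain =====

-- B replaces A's dense scatter-increment array + index(max(...)) by a hash-map frequency
-- counter and a single running first-argmax sweep over the candidate positions (objective:
-- alternative algorithm of the same cost; equivalence proved on non-empty lists).


-- ===== PORT A =====
-- 'test_nums[i] += 1' (read, add one, write back; Python index semantics via pyIdx?:
-- none = IndexError — unreachable in whosdaMax's calls, every index is in range there)
def pyIncAt (t : List Int) (i : Int) : List Int :=
  match PySem.List.pyIdx? t.length i with
  | some j => t.set j (t.getD j 0 + 1)
  | none => t

-- the loop body inlines 'idx = sample - loc'; the five increments happen in Python's order
def whosdaMax (lst : List Int) : Int :=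
  match PySem.List.max? lst (fun x => x), PySem.List.min? lst (fun x => x) with
  | some mx, some mn =>
      let test_nums := PySem.List.pyRepeat [(0 : Int)] (mx - mn + 5)
      let loc := mn - 2
      let t := lst.foldl (fun t sample =>
        pyIncAt (pyIncAt (pyIncAt (pyIncAt (pyIncAt t
          (sample - loc - 2)) (sample - loc - 1)) (sample - loc)) (sample - loc + 1)) (sample - loc + 2)) test_nums
      match PySem.List.max? t (fun x => x) with
      | some m =>
          match PySem.List.index? t m with
          | some k => (k : Int) + loc
          | none => 0        -- unreachable: the maximum is a member of t
      | none => 0            -- unreachable: t has length ≥ 5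
  | _, _ => 0                -- ValueError on the empty list (excluded by Pre_)

-- ===== PORT B =====
def whosdaMax_alt (lst : List Int) : Int :=
  match PySem.List.min? lst (fun x => x) with
  | none => 0                -- ValueError on the empty list (excluded by Pre_)
  | some mn =>
    match PySem.List.max? lst (fun x => x) with
    | none => 0
    | some mx =>
      let freq := lst.foldl (fun d s => d.insert s (d.getD s 0 + 1)) (PySem.Dict.empty : PySem.Dict Int Int)
      let lo := mn - 2
      let hi := mx + 2
      let r := (PySem.List.pyRange lo (hi + 1)).foldl (fun b c =>
          let cnt := freq.getD (c - 2) 0 + freq.getD (c - 1) 0 + freq.getD c 0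
                       + freq.getD (c + 1) 0 + freq.getD (c + 2) 0
          if cnt > b.2 then (c, cnt) else b) ((0 : Int), (-1 : Int))
      r.1

-- ===== PRECONDITION & SPEC =====
-- Pre_ excludes exactly the empty list, on which A raises ValueError (max() of empty sequence)
def Pre_whosdaMax (lst : List Int) : Prop := lst ≠ []
instance (lst : List Int) : Decidable (Pre_whosdaMax lst) := by unfold Pre_whosdaMax; infer_instance
def pvWitness_whosdaMax : List Int := [1]

def Spec_whosdaMax (lst : List Int) (out : Int) : Prop := out = whosdaMax_alt lst
instance (lst : List Int) (out : Int) : Decidable (Spec_whosdaMax lst out) := by unfold Spec_whosdaMax; infer_instance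

-- ===== CLAIM (what is proved, stated in full; the proofs are below) =====
def Claim_equal_whosdaMax : Prop := ∀ (lst : List Int), Dom_whosdaMax lst → Pre_whosdaMax lst → Spec_whosdaMax lst (whosdaMax lst)

-- ===== LEMMAS AND PROOFS =====

-- number of samples within distance 2 of position p (the five exact counts both programs tally)
def cnt (lst : List Int) (p : Int) : Int :=
  (lst.count (p - 2) : Int) + lst.count (p - 1) + lst.count p + lst.count (p + 1) + lst.count (p + 2)

-- reference first-argmax of g over [lo, lo+n): (offset of first maximum, maximum); (0, -1) for n = 0
def fm (g : Int → Int) (lo : Int) : Nat → Nat × Int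
  | 0 => (0, -1)
  | n + 1 =>
      let pm := fm g (lo + 1) n
      if g lo ≥ pm.2 then (0, g lo) else (pm.1 + 1, pm.2)

-- the list [g lo, g (lo+1), …, g (lo+n-1)]
def tl (g : Int → Int) (lo : Int) : Nat → List Int
  | 0 => []
  | n + 1 => g lo :: tl g (lo + 1) n

theorem cnt_nonneg (lst : List Int) (p : Int) : 0 ≤ cnt lst p := by
  unfold cnt; positivity

theorem tl_length (g : Int → Int) : ∀ (n : Nat) (lo : Int), (tl g lo n).length = n := by
  intro n
  induction n with
  | zero => intro lo; rfl
  | succ n ih => intro lo; show (g lo :: tl g (lo+1) n).length = n + 1; simp [ih]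

theorem tl_getD (g : Int → Int) : ∀ (n : Nat) (lo : Int) (k : Nat), k < n →
    (tl g lo n).getD k 0 = g (lo + k) := by
  intro n
  induction n with
  | zero => intro lo k h; omega
  | succ n ih =>
      intro lo k hk
      show (g lo :: tl g (lo+1) n).getD k 0 = g (lo + k)
      cases k with
      | zero => simp
      | succ k =>
          simp only [List.getD_cons_succ]
          rw [ih (lo+1) k (by omega)]
          congr 1
          push_cast
          ring

theorem length_pyIncAt (t : List Int) (i : Int) : (pyIncAt t i).length = t.length := by
  unfold pyIncAt
  rcases PySem.List.pyIdx? t.length i with _ | j <;> simp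

theorem getD_pyIncAt (t : List Int) (i : Int) (h0 : 0 ≤ i) (h1 : i < (t.length : Int)) (k : Nat) :
    (pyIncAt t i).getD k 0 = t.getD k 0 + (if i = (k : Int) then 1 else 0) := by
  unfold pyIncAt
  rw [PySem.List.pyIdx?]
  rw [if_pos h0, if_pos h1]
  simp only [List.getD_eq_getElem?_getD, List.getElem?_set]
  by_cases hik : i.toNat = k
  · have hk : i = (k : Int) := by omega
    have hkl : k < t.length := by omega
    simp [hk, hkl]
  · have hk : i ≠ (k : Int) := by omega
    simp [hik, hk]

theorem cnt_cons (s : Int) (l : List Int) (p : Int) :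
    cnt (s :: l) p = (if p - 2 ≤ s ∧ s ≤ p + 2 then 1 else 0) + cnt l p := by
  unfold cnt
  simp only [List.count_cons]
  push_cast
  by_cases h2 : s = p - 2 <;> by_cases h1 : s = p - 1 <;> by_cases h0 : s = p <;>
    by_cases h3 : s = p + 1 <;> by_cases h4 : s = p + 2 <;>
    simp [h2, h1, h0, h3, h4] <;> (try split_ifs) <;> omega

theorem foldA_len (loc : Int) (l : List Int) : ∀ (t : List Int),
    (l.foldl (fun t sample =>
        pyIncAt (pyIncAt (pyIncAt (pyIncAt (pyIncAt t
          (sample - loc - 2)) (sample - loc - 1)) (sample - loc)) (sample - loc + 1)) (sample - loc + 2)) t).length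
      = t.length := by
  induction l with
  | nil => intro t; rfl
  | cons s l ih =>
      intro t
      simp only [List.foldl_cons]
      rw [ih]
      simp [length_pyIncAt]

theorem foldA_getD (loc : Int) (l : List Int) : ∀ (t : List Int),
    (∀ s ∈ l, 2 ≤ s - loc ∧ s - loc + 2 < (t.length : Int)) →
    ∀ k : Nat, k < t.length →
    (l.foldl (fun t sample =>
        pyIncAt (pyIncAt (pyIncAt (pyIncAt (pyIncAt t
          (sample - loc - 2)) (sample - loc - 1)) (sample - loc)) (sample - loc + 1)) (sample - loc + 2)) t).getD k 0
      = t.getD k 0 + cnt l (loc + k) := by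
  induction l with
  | nil => intro t _ k _; simp [cnt]
  | cons s l ih =>
      intro t hr k hk
      have hs := hr s (by simp)
      set t1 := pyIncAt (pyIncAt (pyIncAt (pyIncAt (pyIncAt t
          (s - loc - 2)) (s - loc - 1)) (s - loc)) (s - loc + 1)) (s - loc + 2) with ht1
      have hlen : t1.length = t.length := by simp [ht1, length_pyIncAt]
      simp only [List.foldl_cons]
      rw [ih t1 (by intro x hx; rw [hlen]; exact hr x (by simp [hx])) k (by omega)]
      have hstep : t1.getD k 0 = t.getD k 0 + (if (loc + k) - 2 ≤ s ∧ s ≤ (loc + k) + 2 then 1 else 0) := by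
        rw [ht1]
        rw [getD_pyIncAt _ _ (by (try simp only [length_pyIncAt]); omega) (by (try simp only [length_pyIncAt]); omega)]
        rw [getD_pyIncAt _ _ (by (try simp only [length_pyIncAt]); omega) (by (try simp only [length_pyIncAt]); omega)]
        rw [getD_pyIncAt _ _ (by (try simp only [length_pyIncAt]); omega) (by (try simp only [length_pyIncAt]); omega)]
        rw [getD_pyIncAt _ _ (by (try simp only [length_pyIncAt]); omega) (by (try simp only [length_pyIncAt]); omega)]
        rw [getD_pyIncAt _ _ (by (try simp only [length_pyIncAt]); omega) (by (try simp only [length_pyIncAt]); omega)]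
        split_ifs <;> omega
      rw [hstep, cnt_cons]
      ring

theorem foldl_max_max (xs : List Int) : ∀ (x y : Int), xs.foldl max (max x y) = max x (xs.foldl max y) := by
  induction xs with
  | nil => intro x y; rfl
  | cons a xs ih =>
      intro x y
      simp only [List.foldl_cons]
      rw [max_assoc, ih]

theorem fm_snd_nonneg (g : Int → Int) (hg : ∀ c, 0 ≤ g c) :
    ∀ (n : Nat) (lo : Int), 1 ≤ n → 0 ≤ (fm g lo n).2 := by
  intro n
  induction n with
  | zero => intro lo h; omega
  | succ n ih =>
      intro lo _
      show 0 ≤ (let pm := fm g (lo + 1) n; if g lo ≥ pm.2 then ((0:Nat), g lo) else (pm.1 + 1, pm.2)).2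
      by_cases h : g lo ≥ (fm g (lo + 1) n).2
      · simp [h]; exact hg lo
      · simp [h]; have := hg lo; omega

theorem Aside (g : Int → Int) (hg : ∀ c, 0 ≤ g c) :
    ∀ (n : Nat) (lo : Int), 1 ≤ n →
      PySem.List.max? (tl g lo n) (fun x => x) = some (fm g lo n).2 ∧
      PySem.List.index? (tl g lo n) (fm g lo n).2 = some (fm g lo n).1 := by
  intro n
  induction n with
  | zero => intro lo h; omega
  | succ n ih =>
      intro lo _
      have hsplit : tl g lo (n+1) = g lo :: tl g (lo+1) n := rfl
      have hfm : fm g lo (n+1)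
          = if g lo ≥ (fm g (lo+1) n).2 then ((0:Nat), g lo)
            else ((fm g (lo+1) n).1 + 1, (fm g (lo+1) n).2) := rfl
      rcases Nat.eq_zero_or_pos n with hn | hn
      · subst hn
        have hcmp : g lo ≥ (fm g (lo+1) 0).2 := by
          show g lo ≥ -1; have := hg lo; omega
        rw [hsplit, hfm, if_pos hcmp]
        constructor
        · rw [PySem.List.max?_id_cons]; rfl
        · exact PySem.List.index?_cons_self _ _
      · obtain ⟨hmx, hidx⟩ := ih (lo + 1) hn
        obtain ⟨r0, rest', hr⟩ : ∃ r0 rest', tl g (lo+1) n = r0 :: rest' := by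
          cases hrc : tl g (lo+1) n with
          | nil => exfalso; have := tl_length g n (lo+1); rw [hrc] at this; simp at this; omega
          | cons a b => exact ⟨a, b, rfl⟩
        have hm' : rest'.foldl max r0 = (fm g (lo+1) n).2 := by
          rw [hr, PySem.List.max?_id_cons] at hmx
          exact Option.some.inj hmx
        have hfold : (tl g (lo+1) n).foldl max (g lo) = max (g lo) (fm g (lo+1) n).2 := by
          rw [hr]
          simp only [List.foldl_cons]
          rw [foldl_max_max, hm']
        rw [hsplit, hfm]
        by_cases hcmp : g lo ≥ (fm g (lo+1) n).2
        · rw [if_pos hcmp]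
          constructor
          · rw [PySem.List.max?_id_cons, hfold]
            simp [max_eq_left hcmp]
          · exact PySem.List.index?_cons_self _ _
        · rw [if_neg hcmp]
          push_neg at hcmp
          constructor
          · rw [PySem.List.max?_id_cons, hfold]
            simp [max_eq_right (le_of_lt hcmp)]
          · show PySem.List.index? (g lo :: tl g (lo+1) n) (fm g (lo+1) n).2 = some ((fm g (lo+1) n).1 + 1)
            rw [PySem.List.index?_cons_of_ne _ (by omega), hidx]
            rfl

theorem Bside (g : Int → Int) (hg : ∀ c, 0 ≤ g c) :
    ∀ (n : Nat) (lo bp bc : Int), -1 ≤ bc →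
      (PySem.List.pyRange lo (lo + n)).foldl (fun b c => if g c > b.2 then (c, g c) else b) (bp, bc)
        = (if (fm g lo n).2 > bc then (lo + ((fm g lo n).1 : Int), (fm g lo n).2) else (bp, bc)) := by
  intro n
  induction n with
  | zero =>
      intro lo bp bc hbc
      rw [PySem.List.pyRange_one_eq_nil (by simp)]
      show (bp, bc) = if (-1 : Int) > bc then _ else (bp, bc)
      rw [if_neg (by omega)]
  | succ n ih =>
      intro lo bp bc hbc
      have hcons : PySem.List.pyRange lo (lo + (n+1 : Nat)) = lo :: PySem.List.pyRange (lo+1) ((lo+1) + n) := by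
        rw [PySem.List.pyRange_one_cons (by push_cast; omega)]
        congr 1
        push_cast
        ring
      rw [hcons]
      simp only [List.foldl_cons]
      have hfm : fm g lo (n+1)
          = if g lo ≥ (fm g (lo+1) n).2 then ((0:Nat), g lo)
            else ((fm g (lo+1) n).1 + 1, (fm g (lo+1) n).2) := rfl
      have hglo := hg lo
      by_cases h2 : g lo ≥ (fm g (lo+1) n).2
      · have hfm2 : fm g lo (n+1) = ((0:Nat), g lo) := by rw [hfm, if_pos h2]
        rw [hfm2]
        by_cases h1 : g lo > bc
        · rw [if_pos h1, ih (lo+1) lo (g lo) (by omega), if_neg (by omega), if_pos (by simp; omega)]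
          simp
        · rw [if_neg h1, ih (lo+1) bp bc hbc, if_neg (by omega), if_neg (by simp; omega)]
      · push_neg at h2
        have hfm2 : fm g lo (n+1) = ((fm g (lo+1) n).1 + 1, (fm g (lo+1) n).2) := by
          rw [hfm, if_neg (by omega)]
        rw [hfm2]
        by_cases h1 : g lo > bc
        · rw [if_pos h1, ih (lo+1) lo (g lo) (by omega), if_pos (by omega), if_pos (by simp; omega)]
          simp only [Prod.mk.injEq]
          refine ⟨by push_cast; omega, trivial⟩
        · rw [if_neg h1, ih (lo+1) bp bc hbc]
          by_cases h3 : (fm g (lo+1) n).2 > bc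
          · rw [if_pos h3, if_pos (by simp; omega)]
            simp only [Prod.mk.injEq]
            refine ⟨by push_cast; omega, trivial⟩
          · rw [if_neg h3, if_neg (by simp; omega)]

-- ===== VERDICT (by name: the statement is the Claim_ definition above) =====
theorem whosdaMax_spec : Claim_equal_whosdaMax := by
  intro lst _ hpre
  unfold Spec_whosdaMax
  rcases h1 : PySem.List.max? lst (fun x => x) with _ | mx
  · exact absurd (((PySem.List.max?_eq_none_iff _ _).mp h1)) hpre
  rcases h2 : PySem.List.min? lst (fun x => x) with _ | mn
  · exact absurd (((PySem.List.min?_eq_none_iff _ _).mp h2)) hpre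
  have hmem : mx ∈ lst := PySem.List.max?_mem h1
  have hmnx : mn ≤ mx := PySem.List.min?_isMin h2 mx hmem
  have hmax : ∀ s ∈ lst, s ≤ mx := PySem.List.max?_isMax h1
  have hmin : ∀ s ∈ lst, mn ≤ s := PySem.List.min?_isMin h2
  have hgpos : ∀ c, 0 ≤ cnt lst c := fun c => cnt_nonneg lst c
  set N : Nat := (mx - mn + 5).toNat with hN
  have hNI : (N : Int) = mx - mn + 5 := by rw [hN]; omega
  have hN1 : 1 ≤ N := by omega
  set loc : Int := mn - 2 with hloc
  -- A's array equals the list of window counts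
  have hlenrep : (List.replicate N (0:Int)).length = N := by simp
  have hinr : ∀ s ∈ lst, 2 ≤ s - loc ∧ s - loc + 2 < ((List.replicate N (0:Int)).length : Int) := by
    intro s hs
    have h3 := hmin s hs
    have h4 := hmax s hs
    rw [hlenrep]
    omega
  have htA : lst.foldl (fun t sample =>
      pyIncAt (pyIncAt (pyIncAt (pyIncAt (pyIncAt t
        (sample - loc - 2)) (sample - loc - 1)) (sample - loc)) (sample - loc + 1)) (sample - loc + 2))
      (List.replicate N 0) = tl (cnt lst) loc N := by
    apply List.ext_getElem
    · rw [foldA_len]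
      simp [tl_length]
    · intro k hk1 hk2
      have hkN : k < N := by
        rw [foldA_len, hlenrep] at hk1
        exact hk1
      have e1 := foldA_getD loc lst (List.replicate N 0) hinr k (by rw [hlenrep]; exact hkN)
      have e2 := tl_getD (cnt lst) N loc k hkN
      rw [List.getD_eq_getElem _ _ hk1] at e1
      rw [List.getD_eq_getElem _ _ hk2] at e2
      rw [e1, e2]
      simp [List.getD_eq_getElem?_getD, hkN]
  obtain ⟨hAm, hAi⟩ := Aside (cnt lst) hgpos N loc hN1
  have hA : whosdaMax lst = ((fm (cnt lst) loc N).1 : Int) + loc := by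
    unfold whosdaMax
    rw [h1, h2]
    simp only [PySem.List.pyRepeat_singleton, ← hN, ← hloc, htA, hAm, hAi]
  have hBs := Bside (fun c => ((lst.count (c - 2) : Int) + lst.count (c - 1) + lst.count c
      + lst.count (c + 1) + lst.count (c + 2))) (by intro c; positivity) N loc 0 (-1) (by omega)
  have hgcnt : (fun c => ((lst.count (c - 2) : Int) + lst.count (c - 1) + lst.count c
      + lst.count (c + 1) + lst.count (c + 2))) = cnt lst := rfl
  have hfm2 : 0 ≤ (fm (cnt lst) loc N).2 := fm_snd_nonneg (cnt lst) hgpos N loc hN1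
  have hB : whosdaMax_alt lst = loc + ((fm (cnt lst) loc N).1 : Int) := by
    unfold whosdaMax_alt
    rw [h2, h1]
    simp only [PySem.Dict.getD_foldl_insert_add_one, PySem.Dict.getD_empty, zero_add]
    rw [show mx + 2 + 1 = loc + (N : Int) from by omega, ← hloc]
    rw [hBs, hgcnt]
    rw [if_pos (by omega)]
  rw [hA, hB]
  omega
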